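-- pv_equiv track=rewrite | github.com/Br41nfck/Public-repo | Olympiad Programming/Python/Max Scores.py | solution
-- ===== SOURCE A (Python) =====
-- def solution(arr):
--     lo = arr[0]
--     hi = arr[0]
--     lob = 0
--     hib = 0
--     for i in range(1,len(arr)):
--         if arr[i] < lo:
--             lob += 1
--             lo = arr[i]
--         if arr[i] > hi:
--             hib += 1
--             hi = arr[i]
--     return [hib, lob]
-- ===== SOURCE B (Python) =====
-- def _scan(xs, f):
--     out = []
--     cur = None
--     for x in xs:
--         cur = x if cur is None else f(cur, x)
--         out.append(cur)
--     return out
--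
-- def solution(arr):
--     maxs = _scan(arr, max)
--     mins = _scan(arr, min)
--     hib = sum(1 for a, b in zip(maxs, maxs[1:]) if a < b)
--     lob = sum(1 for a, b in zip(mins, mins[1:]) if b < a)
--     return [hib, lob]
-- ===== Notes on version B (the rewrite author's own statement) =====
-- stated objective: alternative
-- what changed: B first materialises the running-max and running-min prefix tables with an accumulate-style scan, then counts strict adjacent changes in each table by zipping it with its tail, instead of A's single index loop that mutates lo/hi/lob/hib in place.
import Mathlib
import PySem

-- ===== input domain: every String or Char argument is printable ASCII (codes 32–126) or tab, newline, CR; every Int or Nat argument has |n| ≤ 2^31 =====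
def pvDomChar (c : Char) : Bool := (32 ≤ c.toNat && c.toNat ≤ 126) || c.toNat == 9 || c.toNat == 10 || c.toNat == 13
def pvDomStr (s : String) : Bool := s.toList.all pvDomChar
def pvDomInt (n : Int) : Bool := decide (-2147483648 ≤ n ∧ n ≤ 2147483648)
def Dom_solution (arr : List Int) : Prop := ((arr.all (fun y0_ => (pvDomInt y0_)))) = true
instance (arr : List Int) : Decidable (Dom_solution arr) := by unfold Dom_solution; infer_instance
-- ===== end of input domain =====

-- B replaces A's single mutating index loop by prefix running-max/min tables plus an
-- adjacent-change count (alternative decomposition, same cost); Pre_ excludes [] where A raises.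

-- ===== PORT A =====
-- loop body of A's for-loop over indices; state is (lo, hi, lob, hib)
def solStep (st : Int × Int × Int × Int) (x : Int) : Int × Int × Int × Int :=
  let lo := st.1
  let hi := st.2.1
  let lob := st.2.2.1
  let hib := st.2.2.2
  let p1 : Int × Int := if x < lo then (x, lob + 1) else (lo, lob)
  let p2 : Int × Int := if x > hi then (x, hib + 1) else (hi, hib)
  (p1.1, p2.1, p1.2, p2.2)

def solution (arr : List Int) : List Int :=
  match PySem.List.pyGet? arr 0 with
  | none => []   -- arr[0] raises IndexError here; excluded by Pre_solution
  | some a0 =>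
    let st := (PySem.List.pyRange 1 (PySem.List.len arr) 1).foldl
        (fun st i => solStep st (PySem.List.pyGetD arr i 0)) (a0, a0, 0, 0)
    [st.2.2.2, st.2.2.1]

-- ===== PORT B =====
-- _scan(xs, f): running accumulation; cur is None before the first element
def scanStep (f : Int → Int → Int) (acc : List Int × Option Int) (x : Int) :
    List Int × Option Int :=
  let cur := match acc.2 with | none => x | some c => f c x
  (acc.1 ++ [cur], some cur)

def pyScan (xs : List Int) (f : Int → Int → Int) : List Int :=
  (xs.foldl (scanStep f) ([], none)).1

-- sum(1 for a, b in zip(xs, xs[1:]) if p a b); xs[1:] = xs.drop 1 (exact: nonneg index)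
def countPairs (p : Int → Int → Bool) (xs : List Int) : Int :=
  ((xs.zip (xs.drop 1)).map (fun q => if p q.1 q.2 then (1 : Int) else 0)).sum

def solution_alt (arr : List Int) : List Int :=
  let maxs := pyScan arr max
  let mins := pyScan arr min
  let hib := countPairs (fun a b => a < b) maxs
  let lob := countPairs (fun a b => b < a) mins
  [hib, lob]

-- ===== PRECONDITION & SPEC =====
-- Pre_ excludes only the empty list, on which A's 'arr[0]' raises IndexError.
def Pre_solution (arr : List Int) : Prop := arr ≠ []
instance (arr : List Int) : Decidable (Pre_solution arr) := by unfold Pre_solution; infer_instance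
def pvWitness_solution : List Int := ([3, 1, 4, 1, 5] : List Int)

def Spec_solution (arr : List Int) (out : List Int) : Prop := out = solution_alt arr
instance (arr : List Int) (out : List Int) : Decidable (Spec_solution arr out) := by unfold Spec_solution; infer_instance

-- ===== CLAIM (what is proved, stated in full; the proofs are below) =====
def Claim_equal_solution : Prop := ∀ (arr : List Int), Dom_solution arr → Pre_solution arr → Spec_solution arr (solution arr)
-- ===== LEMMAS AND PROOFS =====

-- the running-accumulation sequence starting after a first value c
def runScan (f : Int → Int → Int) : Int → List Int → List Int
  | _, [] => []
  | c, x :: t => f c x :: runScan f (f c x) t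

-- count of elements that strictly change the accumulator, starting from c
def cntF (f : Int → Int → Int) (p : Int → Int → Bool) : Int → List Int → Int
  | _, [] => 0
  | c, x :: t => (if p c x then 1 else 0) + cntF f p (f c x) t

theorem solStep_eq (lo hi lob hib x : Int) :
    solStep (lo, hi, lob, hib) x =
      (min lo x, max hi x, lob + (if x < lo then 1 else 0), hib + (if hi < x then 1 else 0)) := by
  simp only [solStep]
  split_ifs with h1 h2 h2 <;> simp_all [le_of_lt, le_of_not_gt]

theorem foldl_solStep (t : List Int) : ∀ lo hi lob hib : Int,
    t.foldl solStep (lo, hi, lob, hib) =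
      (t.foldl min lo, t.foldl max hi,
        lob + cntF min (fun c x => x < c) lo t,
        hib + cntF max (fun c x => c < x) hi t) := by
  induction t with
  | nil => intro lo hi lob hib; simp [cntF]
  | cons x t ih =>
    intro lo hi lob hib
    simp only [List.foldl_cons, solStep_eq, ih, cntF]
    simp only [Prod.mk.injEq, decide_eq_true_eq]
    refine ⟨trivial, trivial, ?_, ?_⟩ <;> split_ifs <;> omega

theorem foldl_scanStep (f : Int → Int → Int) (t : List Int) : ∀ (c : Int) (acc : List Int),
    t.foldl (scanStep f) (acc, some c) = (acc ++ runScan f c t, some (t.foldl f c)) := by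
  induction t with
  | nil => intro c acc; simp [runScan]
  | cons x t ih =>
    intro c acc
    simp only [List.foldl_cons, scanStep, runScan, ih]
    simp

theorem pyScan_cons (f : Int → Int → Int) (a : Int) (t : List Int) :
    pyScan (a :: t) f = a :: runScan f a t := by
  simp [pyScan, scanStep, foldl_scanStep]

theorem countPairs_runScan (f : Int → Int → Int) (p : Int → Int → Bool)
    (hp : ∀ c x, p c (f c x) = p c x) (t : List Int) : ∀ c : Int,
    countPairs p (c :: runScan f c t) = cntF f p c t := by
  induction t with
  | nil => intro c; simp [countPairs, runScan, cntF]
  | cons x t ih =>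
    intro c
    have h := ih (f c x)
    simp only [countPairs, runScan, List.drop_succ_cons, List.drop_zero, List.zip_cons_cons,
      List.map_cons, List.sum_cons, cntF, hp] at *
    omega

-- ===== VERDICT (by name: the statement is the Claim_ definition above) =====
theorem solution_spec : Claim_equal_solution := by
  intro arr _ hpre
  unfold Spec_solution
  match arr, hpre with
  | a0 :: t, _ =>
    simp only [solution, PySem.List.pyGet?_zero_cons]
    rw [PySem.List.foldl_pyRange_pyGetD (a0 :: t) 0 solStep (a0, a0, 0, 0) (by norm_num : (0:Int) ≤ 1)]
    simp only [Int.toNat_one, List.drop_succ_cons, List.drop_zero]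
    rw [foldl_solStep]
    simp only [solution_alt, pyScan_cons]
    rw [countPairs_runScan max (fun a b => a < b) (by intro c x; simp [max_def]; omega),
        countPairs_runScan min (fun a b => b < a) (by intro c x; simp [min_def]; omega)]
    simp
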